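-- pv_equiv track=rewrite | github.com/menguri/marl-lab | scripts/run_with_wandb.py | merge_with_arguments
-- ===== SOURCE A (Python) =====
-- from typing import Any, Dict, Iterable, List
--
-- def merge_with_arguments(primary: Iterable[str] | None, override: Iterable[str] | None) -> List[str]:
--     def arg_key(token: str) -> str | None:
--         if "=" not in token:
--             return None
--         return token.split("=", 1)[0]
--
--     merged: List[str] = []
--     for token_list in (primary or [], override or []):
--         for token in token_list:
--             if not token:
--                 continue
--             if token == "with":
--                 continue
--             key = arg_key(token)
--             if key:
--                 for idx in range(len(merged) - 1, -1, -1):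
--                     if arg_key(merged[idx]) == key:
--                         merged.pop(idx)
--                         break
--             merged.append(token)
--     return merged
-- ===== SOURCE B (Python) =====
-- def merge_with_arguments(primary, override):
--     def key_of(token):
--         head, sep, _ = token.partition("=")
--         return head if sep and head else None
--
--     tokens = [t for t in (list(primary or []) + list(override or [])) if t and t != "with"]
--     out = []
--     seen = set()
--     for token in reversed(tokens):
--         k = key_of(token)
--         if k is not None:
--             if k in seen:
--                 continue
--             seen.add(k)
--         out.append(token)
--     out.reverse()
--     return out
-- ===== Notes on version B (the rewrite author's own statement) =====
-- stated objective: alternative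
-- what changed: A appends tokens while scanning the accumulated list backwards to pop an earlier token with the same key; B filters once, then does a single right-to-left pass keeping a set of already-seen keys, emitting a token unless its key was seen, and reverses at the end.
import Mathlib
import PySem

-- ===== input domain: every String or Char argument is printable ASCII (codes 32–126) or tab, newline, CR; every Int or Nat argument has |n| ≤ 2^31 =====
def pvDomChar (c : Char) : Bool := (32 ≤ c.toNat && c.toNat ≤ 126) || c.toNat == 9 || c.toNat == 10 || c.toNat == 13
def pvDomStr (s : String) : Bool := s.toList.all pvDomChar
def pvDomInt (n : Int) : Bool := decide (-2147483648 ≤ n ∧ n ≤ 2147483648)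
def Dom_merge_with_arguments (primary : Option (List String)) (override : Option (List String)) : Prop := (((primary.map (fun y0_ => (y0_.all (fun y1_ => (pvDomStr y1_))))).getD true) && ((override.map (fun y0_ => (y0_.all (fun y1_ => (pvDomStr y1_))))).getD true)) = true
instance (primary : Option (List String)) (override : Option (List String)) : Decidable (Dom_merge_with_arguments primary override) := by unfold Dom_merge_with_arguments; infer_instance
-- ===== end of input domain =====

-- B replaces A's per-token backwards pop-scan of the accumulator with a single
-- right-to-left pass over the token list keeping a set of already-seen keys (alternative).

-- ===== PORT A =====

-- arg_key: token.split("=", 1)[0] is exactly the characters before the first '=' (exact, sep is "=")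
def argKeyA (t : String) : Option String :=
  if PySem.Str.isIn "=" t then some (String.ofList (t.toList.takeWhile (· ≠ '='))) else none

-- A's inner backwards index loop with pop-and-break: scanning the REVERSED list,
-- remove the first element whose key is k (= pop the last matching index), stop there.
def popScanA (k : String) : List String → List String
  | [] => []
  | x :: xs => if argKeyA x = some k then xs else x :: popScanA k xs

-- one iteration of A's token loop (continue-branches, key test, pop, append)
def stepA (merged : List String) (token : String) : List String :=
  if token = "" then merged
  else if token = "with" then merged
  else
    match argKeyA token with
    | some k => if k ≠ "" then (popScanA k merged.reverse).reverse ++ [token]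
                else merged ++ [token]
    | none => merged ++ [token]

def merge_with_arguments (primary : Option (List String)) (override : Option (List String)) : List String :=
  List.foldl stepA (List.foldl stepA [] (primary.getD [])) (override.getD [])

-- ===== PORT B =====

-- key_of: head of token.partition("="), or None when there is no '=' or the head is empty
def argKeyB (t : String) : Option String :=
  let head := t.toList.takeWhile (· ≠ '=')
  if '=' ∈ t.toList ∧ head ≠ [] then some (String.ofList head) else none

-- B's single loop over reversed(tokens): keep a token unless its key was already seen
def goB (seen : PySem.Set String) : List String → List String
  | [] => []
  | t :: ts =>
    match argKeyB t with
    | none => t :: goB seen ts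
    | some k =>
        if PySem.Set.contains seen k then goB seen ts
        else t :: goB (PySem.Set.add seen k) ts

def merge_with_arguments_alt (primary : Option (List String)) (override : Option (List String)) : List String :=
  let tokens := ((primary.getD []) ++ (override.getD [])).filter (fun t => !(t == "") && !(t == "with"))
  (goB PySem.Set.empty tokens.reverse).reverse

-- ===== PRECONDITION & SPEC =====

def Spec_merge_with_arguments (primary : Option (List String)) (override : Option (List String)) (out : List String) : Prop :=
  out = merge_with_arguments_alt primary override

instance (primary : Option (List String)) (override : Option (List String)) (out : List String) :
    Decidable (Spec_merge_with_arguments primary override out) := by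
  unfold Spec_merge_with_arguments; infer_instance

-- ===== CLAIM =====

def Claim_equal_merge_with_arguments : Prop :=
  ∀ (primary : Option (List String)) (override : Option (List String)),
    Dom_merge_with_arguments primary override →
    Spec_merge_with_arguments primary override (merge_with_arguments primary override)

-- ===== LEMMAS AND PROOFS =====

-- key bridge: whenever B's key_of returns a key, A's arg_key returns the same, nonempty key
theorem keyB_some {t k : String} (h : argKeyB t = some k) : argKeyA t = some k ∧ k ≠ "" := by
  unfold argKeyB at h
  simp only at h
  split at h
  · rename_i hc
    obtain ⟨hmem, hne⟩ := hc
    cases h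
    constructor
    · unfold argKeyA
      rw [if_pos]
      rw [PySem.Str.isIn_iff_infix]
      show ("=" : String).toList <:+: t.toList
      have : ("=" : String).toList = ['='] := rfl
      rw [this, List.singleton_infix_iff]
      exact hmem
    · intro hcon
      apply hne
      have := congrArg String.toList hcon
      simpa using this
  · cases h

-- key bridge: whenever B's key_of returns None, A's branch `if key:` is not taken either
theorem keyB_none {t : String} (h : argKeyB t = none) :
    ∀ k, k ≠ "" → argKeyA t ≠ some k := by
  intro k hk hcon
  unfold argKeyA at hcon
  split at hcon
  · rename_i hin
    rw [PySem.Str.isIn_iff_infix] at hin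
    have hmem : '=' ∈ t.toList := by
      have h1 : ("=" : String).toList = ['='] := rfl
      rw [h1, List.singleton_infix_iff] at hin
      exact hin
    unfold argKeyB at h
    simp only at h
    split at h
    · cases h
    · rename_i hc
      have hhead : t.toList.takeWhile (· ≠ '=') = [] := by
        by_contra hne
        exact hc ⟨hmem, hne⟩
      cases hcon
      apply hk
      rw [hhead]
  · cases hcon

-- goB only reads the membership of `seen`
theorem goB_congr (ts : List String) : ∀ (s₁ s₂ : PySem.Set String),
    (∀ x, x ∈ s₁ ↔ x ∈ s₂) → goB s₁ ts = goB s₂ ts := by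
  induction ts with
  | nil => intro _ _ _; rfl
  | cons t ts ih =>
    intro s₁ s₂ hmem
    cases hkb : argKeyB t with
    | none => simp only [goB, hkb]; rw [ih _ _ hmem]
    | some k =>
      have hc : PySem.Set.contains s₁ k = PySem.Set.contains s₂ k := by
        unfold PySem.Set.contains
        rw [Bool.eq_iff_iff, List.contains_iff_mem, List.contains_iff_mem]
        exact hmem k
      simp only [goB, hkb, hc]
      by_cases hck : PySem.Set.contains s₂ k = true
      · simp only [if_pos hck]; exact ih _ _ hmem
      · simp only [if_neg hck]
        congr 1
        apply ih
        intro x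
        simp only [PySem.Set.mem_add]
        rw [hmem x]

theorem contains_iff {s : PySem.Set String} {k : String} :
    PySem.Set.contains s k = true ↔ k ∈ s := by
  unfold PySem.Set.contains
  exact List.contains_iff_mem

-- A's pop of the last same-key element, applied to B's scan output, equals running
-- B's scan with the key already marked as seen
theorem popScan_goB (rs : List String) : ∀ (seen : PySem.Set String) (k : String),
    k ≠ "" → k ∉ seen →
    popScanA k (goB seen rs) = goB (PySem.Set.add seen k) rs := by
  induction rs with
  | nil => intro _ _ _ _; rfl
  | cons t rest ih =>
    intro seen k hk hns
    cases hkb : argKeyB t with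
    | none =>
      have hA : argKeyA t ≠ some k := keyB_none hkb k hk
      simp only [goB, hkb, popScanA, if_neg hA]
      rw [ih seen k hk hns]
    | some k' =>
      obtain ⟨hAk', hk'ne⟩ := keyB_some hkb
      by_cases hkk : k' = k
      · subst hkk
        have h2 : PySem.Set.contains (PySem.Set.add seen k') k' = true := by
          rw [contains_iff, PySem.Set.mem_add]; right; rfl
        simp only [goB, hkb, h2, if_pos,
          if_neg (fun h => hns (contains_iff.mp h))]
        simp only [popScanA, if_pos hAk']
      · have hAne : argKeyA t ≠ some k := by
          rw [hAk']; intro h; exact hkk (Option.some.inj h)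
        by_cases hck : PySem.Set.contains seen k' = true
        · have h2 : PySem.Set.contains (PySem.Set.add seen k) k' = true := by
            rw [contains_iff, PySem.Set.mem_add]; left; exact contains_iff.mp hck
          simp only [goB, hkb, if_pos hck, if_pos h2]
          exact ih seen k hk hns
        · have h2 : ¬ PySem.Set.contains (PySem.Set.add seen k) k' = true := by
            rw [contains_iff, PySem.Set.mem_add]
            rintro (h | h)
            · exact hck (contains_iff.mpr h)
            · exact hkk h
          simp only [goB, hkb, if_neg hck, if_neg h2]
          simp only [popScanA, if_neg hAne]
          have hns' : k ∉ PySem.Set.add seen k' := by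
            rw [PySem.Set.mem_add]
            rintro (h | h)
            · exact hns h
            · exact hkk h.symm
          rw [ih _ k hk hns']
          congr 1
          apply goB_congr
          intro x
          simp only [PySem.Set.mem_add]
          tauto

-- A's whole token loop (on already-filtered tokens) is B's reversed scan
theorem foldl_stepA_eq (ts : List String) :
    (∀ t ∈ ts, ¬(t = "" ∨ t = "with")) →
    List.foldl stepA [] ts = (goB PySem.Set.empty ts.reverse).reverse := by
  induction ts using List.reverseRecOn with
  | nil => intro _; rfl
  | append_singleton ts t ih =>
    intro hall
    have ht : ¬(t = "" ∨ t = "with") := hall t (by simp)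
    have hts : ∀ u ∈ ts, ¬(u = "" ∨ u = "with") := fun u hu => hall u (by simp [hu])
    rw [List.foldl_append, List.foldl_cons, List.foldl_nil, ih hts, List.reverse_append,
        List.reverse_singleton, List.singleton_append]
    cases hkb : argKeyB t with
    | none =>
      simp only [goB, hkb, List.reverse_cons]
      unfold stepA
      rw [if_neg (fun h => ht (Or.inl h)), if_neg (fun h => ht (Or.inr h))]
      cases hka : argKeyA t with
      | none => rfl
      | some k =>
        have hke : k = "" := by
          by_contra hkne
          exact keyB_none hkb k hkne hka
        simp [hke]
    | some k =>
      obtain ⟨hka, hkne⟩ := keyB_some hkb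
      have hc : ¬ PySem.Set.contains PySem.Set.empty k = true := by
        rw [contains_iff]; simp [PySem.Set.empty]
      simp only [goB, hkb, if_neg hc, List.reverse_cons]
      unfold stepA
      rw [if_neg (fun h => ht (Or.inl h)), if_neg (fun h => ht (Or.inr h)), hka]
      simp only [if_pos hkne]
      rw [List.reverse_reverse,
        popScan_goB _ _ _ hkne (by simp [PySem.Set.empty])]

-- A's continue-branches ignore exactly the tokens B's filter removes
theorem foldl_stepA_filter (ts : List String) : ∀ acc,
    List.foldl stepA acc ts = List.foldl stepA acc (ts.filter (fun t => !(t == "") && !(t == "with"))) := by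
  induction ts with
  | nil => intro _; rfl
  | cons t ts ih =>
    intro acc
    by_cases h1 : t = ""
    · subst h1; simp [List.filter, stepA, ih]
    · by_cases h2 : t = "with"
      · subst h2; simp [List.filter, stepA, ih]
      · have : (fun t => !(t == "") && !(t == "with")) t = true := by simp [h1, h2]
        simp only [List.filter_cons, this, List.foldl_cons]
        exact ih _

-- ===== VERDICT =====

theorem merge_with_arguments_spec : Claim_equal_merge_with_arguments := by
  intro primary override _
  unfold Spec_merge_with_arguments merge_with_arguments merge_with_arguments_alt
  rw [← List.foldl_append, foldl_stepA_filter]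
  apply foldl_stepA_eq
  intro t ht
  rw [List.mem_filter] at ht
  rcases ht with ⟨_, hp⟩
  simp only [Bool.and_eq_true, Bool.not_eq_true', beq_eq_false_iff_ne] at hp
  tauto
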